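-- pv_equiv track=rewrite | github.com/ChaiGans/Bondowoso-Ganteng | builtin.py | remove_row
-- ===== SOURCE A (Python) =====
-- def length(list):
--     count = 0
--     for x in list: #revisi. tuple
--         count += 1
--     return count
--
-- def remove_row(data, user_name):
--     count = 0
--     for i in range(length(data)):
--         if data[i][0] != user_name:
--             count += 1
--     listbaru = [0 for i in range(count)]
--     count = 0
--     for i in range(length(data)):
--         if data[i][0] != user_name:
--             listbaru[count] = data[i]
--             count += 1
--     return listbaru
-- ===== SOURCE B (Python) =====
-- def remove_row(data, user_name):
--     return [row for row in data if row[0] != user_name]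
-- ===== Notes on version B (the rewrite author's own statement) =====
-- stated objective: simpler
-- what changed: Replaces the count pass + zero-preallocated list + index-fill pass with a single filtering comprehension building the result in one traversal.
import Mathlib
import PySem

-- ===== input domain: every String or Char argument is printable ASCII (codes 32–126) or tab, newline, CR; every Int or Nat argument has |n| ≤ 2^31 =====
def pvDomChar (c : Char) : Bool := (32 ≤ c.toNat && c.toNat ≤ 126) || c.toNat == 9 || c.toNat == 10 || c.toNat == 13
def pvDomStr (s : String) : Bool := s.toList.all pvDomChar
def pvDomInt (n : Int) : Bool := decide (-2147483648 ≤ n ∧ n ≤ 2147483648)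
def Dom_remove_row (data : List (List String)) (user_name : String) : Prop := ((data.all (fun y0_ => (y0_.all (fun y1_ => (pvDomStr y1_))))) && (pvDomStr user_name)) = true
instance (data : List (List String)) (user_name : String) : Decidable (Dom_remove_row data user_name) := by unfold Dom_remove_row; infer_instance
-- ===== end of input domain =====

-- B replaces A's count pass + zero-preallocated list + index-fill pass with one filtering traversal (objective: simpler).

-- ===== PORT A =====
-- module helper 'length': counts elements with a loop
def pyLength (xs : List (List String)) : Int :=
  xs.foldl (fun count _ => count + 1) 0

-- data[i][0] is ported as pyGetD with default values; inside Pre_ every index is in range, so the defaults are never read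
def remove_row (data : List (List String)) (user_name : String) : List (List String) :=
  -- first loop: count rows whose first field differs
  let count : Int :=
    (PySem.List.pyRange 0 (pyLength data) 1).foldl
      (fun count i =>
        if PySem.List.pyGetD (PySem.List.pyGetD data i []) 0 "" != user_name then count + 1 else count) 0
  -- listbaru = [0 for i in range(count)]: preallocated placeholder list ([] stands for Python's 0; every slot is overwritten)
  let listbaru : List (List String) := List.replicate count.toNat []
  -- second loop: fill by index, tracking the write position
  (((PySem.List.pyRange 0 (pyLength data) 1).foldl
      (fun (s : List (List String) × Int) i =>
        if PySem.List.pyGetD (PySem.List.pyGetD data i []) 0 "" != user_name then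
          (s.1.set s.2.toNat (PySem.List.pyGetD data i []), s.2 + 1)
        else s)
      (listbaru, 0))).1

-- ===== PORT B =====
def remove_row_alt (data : List (List String)) (user_name : String) : List (List String) :=
  data.filter (fun row => PySem.List.pyGetD row 0 "" != user_name)

-- ===== PRECONDITION & SPEC =====
-- Pre_ excludes inputs containing an empty row, on which both A and B raise IndexError at row[0].
def Pre_remove_row (data : List (List String)) (_user_name : String) : Prop :=
  ∀ row ∈ data, row ≠ []
instance (data : List (List String)) (user_name : String) : Decidable (Pre_remove_row data user_name) := by unfold Pre_remove_row; infer_instance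

def pvWitness_remove_row : List (List String) × String := ([["a", "1"], ["b", "2"], ["a", "3"]], "a")

def Spec_remove_row (data : List (List String)) (user_name : String) (out : List (List String)) : Prop := out = remove_row_alt data user_name
instance (data : List (List String)) (user_name : String) (out : List (List String)) : Decidable (Spec_remove_row data user_name out) := by unfold Spec_remove_row; infer_instance

-- ===== CLAIM (what is proved, stated in full; the proofs are below) =====
def Claim_equal_remove_row : Prop := ∀ (data : List (List String)) (user_name : String), Dom_remove_row data user_name → Pre_remove_row data user_name → Spec_remove_row data user_name (remove_row data user_name)

-- ===== LEMMAS AND PROOFS =====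

-- the module's hand-rolled length equals List.length
theorem pyLength_eq (xs : List (List String)) : pyLength xs = (xs.length : Int) := by
  simpa [pyLength] using PySem.List.foldl_count_if (fun _ : List String => true) xs 0

-- the index-fill loop, run over the row list itself, extends pre by filter p
theorem fill_loop (p : List String → Bool) :
    ∀ (xs pre : List (List String)),
    (xs.foldl
        (fun (s : List (List String) × Int) row =>
          if p row then (s.1.set s.2.toNat row, s.2 + 1) else s)
        (pre ++ List.replicate (xs.countP p) [], (pre.length : Int))).1
      = pre ++ xs.filter p := by
  intro xs
  induction xs with
  | nil => intro pre; simp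
  | cons x xs ih =>
    intro pre
    by_cases hx : p x
    · have hset : (pre ++ List.replicate (xs.countP p + 1) []).set pre.length x
          = (pre ++ [x]) ++ List.replicate (xs.countP p) [] := by
        simp [List.replicate_succ]
      have hInt : ((pre.length : Int) + 1) = ((pre ++ [x]).length : Int) := by simp
      simp only [List.foldl_cons, List.countP_cons, hx, if_pos, List.filter_cons, Int.toNat_natCast]
      rw [hset, hInt, ih (pre ++ [x])]
      simp
    · simp only [List.foldl_cons, List.countP_cons, hx, List.filter_cons]
      simpa using ih pre

-- ===== VERDICT (by name: the statement is the Claim_ definition above) =====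
theorem remove_row_spec : Claim_equal_remove_row := by
  intro data user_name _hdom _hpre
  unfold Spec_remove_row remove_row remove_row_alt
  simp only [pyLength_eq]
  rw [PySem.List.foldl_pyRange_zero_pyGetD' data ([] : List String)
      (fun (count : Int) row => if PySem.List.pyGetD row 0 "" != user_name then count + 1 else count) 0,
    PySem.List.foldl_count_if, Int.zero_add,
    PySem.List.foldl_pyRange_zero_pyGetD' data ([] : List String)
      (fun (s : List (List String) × Int) row =>
        if PySem.List.pyGetD row 0 "" != user_name then (s.1.set s.2.toNat row, s.2 + 1) else s)
      (List.replicate ((List.countP (fun row => PySem.List.pyGetD row 0 "" != user_name) data : Int)).toNat [], 0),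
    Int.toNat_natCast]
  simpa using fill_loop (fun row => PySem.List.pyGetD row 0 "" != user_name) data []
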